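-- pv_equiv track=rewrite | github.com/DrNAlvarez/Dysregulation-of-alternative-splicing-patterns-in-the-ovaries-of-reproductively-aged-mice- | Figure_5/Figure_5_module.py | find_last_feature
-- ===== SOURCE A (Python) =====
-- def find_last_feature(feature_string, match_list):
--     """
--     Determines which feature from the match list comes last in the feature string.
--
--     Args:
--         feature_string (str): The input string containing features separated by '_'.
--         match_list (list): A list of features to search for in the string.
--
--     Returns:
--         str: The feature from the match list that comes last, or None if no match is found.
--     """
--     # Split the string by '_'
--     split_parts = feature_string.split('_')
--
--     # Track the last position and feature
--     last_feature = None
--     last_position = -1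
--
--     # Iterate over the match list to find the last occurrence
--     for feature in match_list:
--         if feature in split_parts:
--             position = split_parts.index(feature)
--             if position > last_position:
--                 last_position = position
--                 last_feature = feature
--
--     return last_feature
-- ===== SOURCE B (Python) =====
-- def find_last_feature(feature_string, match_list):
--     """Single left-to-right scan of the parts: record each matching part at its
--     first occurrence; the last one recorded is the match-list feature whose first
--     occurrence comes last. Returns None if no match."""
--     matches = set(match_list)
--     seen = set()
--     last_feature = None
--     for part in feature_string.split('_'):
--         if part in matches and part not in seen:
--             seen.add(part)
--             last_feature = part
--     return last_feature
-- ===== Notes on version B (the rewrite author's own statement) =====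
-- stated objective: idiomatic
-- what changed: Instead of looping over match_list and running 'in'/'.index' scans over the split parts for each feature (quadratic), B builds a set from match_list and makes one pass over the split parts, recording each matching part at its first occurrence; the last recorded part is the answer.
import Mathlib
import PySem

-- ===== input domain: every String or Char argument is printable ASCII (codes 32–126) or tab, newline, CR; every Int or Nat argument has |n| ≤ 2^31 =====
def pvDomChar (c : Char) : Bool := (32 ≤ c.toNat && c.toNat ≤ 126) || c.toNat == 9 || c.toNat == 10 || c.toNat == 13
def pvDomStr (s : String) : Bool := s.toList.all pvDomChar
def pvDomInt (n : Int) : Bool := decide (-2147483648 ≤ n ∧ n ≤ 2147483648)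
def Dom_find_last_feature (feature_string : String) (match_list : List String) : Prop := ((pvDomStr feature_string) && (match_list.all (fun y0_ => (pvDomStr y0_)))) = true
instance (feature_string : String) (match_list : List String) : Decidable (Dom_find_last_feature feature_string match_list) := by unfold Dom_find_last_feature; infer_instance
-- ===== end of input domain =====

-- B replaces A's per-feature membership/.index scans over the split parts by one
-- left-to-right pass over the parts with a match set and a seen set (idiomatic).

-- ===== PORT A =====
-- the body of A's `for feature in match_list:` loop
def pvAStep (split_parts : List String) (st : Option String × Int) (feature : String) : Option String × Int :=
  if feature ∈ split_parts then
    match PySem.List.index? split_parts feature with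
    | some position => if (position : Int) > st.2 then (some feature, (position : Int)) else st
    | none => st   -- unreachable: guarded by the membership test
  else st

def find_last_feature (feature_string : String) (match_list : List String) : Option String :=
  let split_parts := (PySem.Str.split? feature_string "_").getD []   -- sep "_" ≠ "": split? is always some
  (match_list.foldl (pvAStep split_parts) (none, -1)).1

-- ===== PORT B =====
-- the body of B's `for part in feature_string.split('_'):` loop
def pvBStep (mset : PySem.Set String) (st : PySem.Set String × Option String) (part : String) : PySem.Set String × Option String :=
  if PySem.Set.contains mset part && !PySem.Set.contains st.1 part then
    (PySem.Set.add st.1 part, some part)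
  else st

def find_last_feature_alt (feature_string : String) (match_list : List String) : Option String :=
  let mset := PySem.Set.ofList match_list
  (((PySem.Str.split? feature_string "_").getD []).foldl (pvBStep mset) (PySem.Set.empty, none)).2

-- ===== PRECONDITION & SPEC =====
def Spec_find_last_feature (feature_string : String) (match_list : List String) (out : Option String) : Prop := out = find_last_feature_alt feature_string match_list
instance (feature_string : String) (match_list : List String) (out : Option String) : Decidable (Spec_find_last_feature feature_string match_list out) := by unfold Spec_find_last_feature; infer_instance

-- ===== CLAIM (what is proved, stated in full; the proofs are below) =====
def Claim_equal_find_last_feature : Prop := ∀ (feature_string : String) (match_list : List String), Dom_find_last_feature feature_string match_list → Spec_find_last_feature feature_string match_list (find_last_feature feature_string match_list)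

-- ===== LEMMAS AND PROOFS =====

-- running maximum (floor acc) of the first-occurrence indices in ps of the features of ms
def pvMax (ps ms : List String) (acc : Int) : Int :=
  ms.foldl (fun a f => match PySem.List.index? ps f with | some k => max a (k : Int) | none => a) acc

theorem pvMax_nil (ps : List String) (acc : Int) : pvMax ps [] acc = acc := rfl

theorem pvMax_cons (ps : List String) (f : String) (ms : List String) (acc : Int) :
    pvMax ps (f :: ms) acc =
      pvMax ps ms (match PySem.List.index? ps f with | some k => max acc (k : Int) | none => acc) := rfl

theorem pvMax_ge_acc (ps ms : List String) (acc : Int) : acc ≤ pvMax ps ms acc := by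
  induction ms generalizing acc with
  | nil => simp [pvMax_nil]
  | cons f ms ih =>
    rw [pvMax_cons]
    cases h : PySem.List.index? ps f with
    | none => simpa using ih acc
    | some k => exact le_trans (le_max_left _ _) (ih _)

theorem pvMax_le (ps ms : List String) (acc B : Int) (hacc : acc ≤ B)
    (h : ∀ f ∈ ms, ∀ k, PySem.List.index? ps f = some k → (k : Int) ≤ B) :
    pvMax ps ms acc ≤ B := by
  induction ms generalizing acc with
  | nil => simpa [pvMax_nil] using hacc
  | cons f ms ih =>
    rw [pvMax_cons]
    cases hf : PySem.List.index? ps f with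
    | none => exact ih acc hacc (fun g hg => h g (List.mem_cons_of_mem _ hg))
    | some k =>
      exact ih _ (max_le hacc (h f List.mem_cons_self k hf))
        (fun g hg => h g (List.mem_cons_of_mem _ hg))

theorem pvMax_ge_of_mem (ps ms : List String) (acc : Int) (f : String) (hf : f ∈ ms)
    (k : Nat) (hk : PySem.List.index? ps f = some k) : (k : Int) ≤ pvMax ps ms acc := by
  induction ms generalizing acc with
  | nil => simp at hf
  | cons g ms ih =>
    rw [pvMax_cons]
    rcases List.mem_cons.mp hf with rfl | hf'
    · rw [hk]
      exact le_trans (le_max_right _ _) (pvMax_ge_acc _ _ _)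
    · exact ih _ hf'

theorem pvMax_congr (ps ps' ms : List String) (acc : Int)
    (h : ∀ f ∈ ms, PySem.List.index? ps f = PySem.List.index? ps' f) :
    pvMax ps ms acc = pvMax ps' ms acc := by
  induction ms generalizing acc with
  | nil => rfl
  | cons f ms ih =>
    rw [pvMax_cons, pvMax_cons, h f List.mem_cons_self]
    exact ih _ (fun g hg => h g (List.mem_cons_of_mem _ hg))

theorem pvMax_achieved (ps ms : List String) (acc : Int) :
    pvMax ps ms acc = acc ∨
      ∃ f ∈ ms, ∃ k, PySem.List.index? ps f = some k ∧ pvMax ps ms acc = (k : Int) := by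
  induction ms generalizing acc with
  | nil => exact Or.inl rfl
  | cons f ms ih =>
    rw [pvMax_cons]
    cases hf : PySem.List.index? ps f with
    | none =>
      rcases ih acc with h | ⟨g, hg, k, hk, he⟩
      · exact Or.inl h
      · exact Or.inr ⟨g, List.mem_cons_of_mem _ hg, k, hk, he⟩
    | some k =>
      rcases ih (max acc (k : Int)) with h | ⟨g, hg, k', hk', he⟩
      · rcases max_cases acc (k : Int) with ⟨hm, _⟩ | ⟨hm, _⟩
        · exact Or.inl (h.trans hm)
        · exact Or.inr ⟨f, List.mem_cons_self, k, hf, h.trans hm⟩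
      · exact Or.inr ⟨g, List.mem_cons_of_mem _ hg, k', hk', he⟩

theorem pvMax_lt_length (ps ms : List String) (h : -1 < pvMax ps ms (-1)) :
    pvMax ps ms (-1) < (ps.length : Int) := by
  rcases pvMax_achieved ps ms (-1) with he | ⟨f, _, k, hk, he⟩
  · omega
  · obtain ⟨hkl, -, -⟩ := PySem.List.getElem_of_index?_eq_some hk
    rw [he]
    exact_mod_cast hkl

-- any in-range pvMax value picks an element of ps, unchanged under appending
theorem pyGet?_append_of_achieved (ps t ms : List String) (h : -1 < pvMax ps ms (-1)) :
    PySem.List.pyGet? (ps ++ t) (pvMax ps ms (-1)) = PySem.List.pyGet? ps (pvMax ps ms (-1)) := by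
  have h2 := pvMax_lt_length ps ms h
  obtain ⟨n, hn⟩ : ∃ n : Nat, pvMax ps ms (-1) = (n : Int) :=
    ⟨(pvMax ps ms (-1)).toNat, (Int.toNat_of_nonneg (by omega)).symm⟩
  have hnl : n < ps.length := by rw [hn] at h2; exact_mod_cast h2
  rw [hn, PySem.List.pyGet?_natCast, PySem.List.pyGet?_natCast, List.getElem?_append_left hnl]

-- A's loop computes the part at the maximal first-occurrence index
theorem aFold_eq (ps ms : List String) (lf : Option String) (lp : Int) :
    ms.foldl (pvAStep ps) (lf, lp) =
      if lp < pvMax ps ms lp then (PySem.List.pyGet? ps (pvMax ps ms lp), pvMax ps ms lp)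
      else (lf, lp) := by
  induction ms generalizing lf lp with
  | nil => simp [pvMax_nil]
  | cons f ms ih =>
    rw [List.foldl_cons, pvMax_cons]
    cases hf : PySem.List.index? ps f with
    | none =>
      have hmem : f ∉ ps := (PySem.List.index?_eq_none_iff _ _).mp hf
      have hf' := hf
      simp only [PySem.List.index?_eq_idxOf?] at hf'
      rw [show pvAStep ps (lf, lp) f = (lf, lp) by simp [pvAStep, hmem]]
      exact ih lf lp
    | some k =>
      obtain ⟨hkl, hget, -⟩ := PySem.List.getElem_of_index?_eq_some hf
      have hmem : f ∈ ps := hget ▸ List.getElem_mem hkl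
      have hf' := hf
      simp only [PySem.List.index?_eq_idxOf?] at hf'
      simp only [hf]
      by_cases hk : lp < (k : Int)
      · rw [show pvAStep ps (lf, lp) f = (some f, (k : Int)) by
          simp [pvAStep, hmem, hf', gt_iff_lt, hk]]
        rw [ih, max_eq_right hk.le]
        have hge : (k : Int) ≤ pvMax ps ms (k : Int) := pvMax_ge_acc _ _ _
        by_cases hlt : (k : Int) < pvMax ps ms (k : Int)
        · rw [if_pos hlt, if_pos (by omega)]
        · have heq : pvMax ps ms (k : Int) = (k : Int) := by omega
          rw [if_neg hlt, if_pos (by omega), heq, PySem.List.pyGet?_natCast,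
            List.getElem?_eq_getElem hkl, hget]
      · rw [show pvAStep ps (lf, lp) f = (lf, lp) by
          simp [pvAStep, hmem, hf', gt_iff_lt, hk]]
        rw [max_eq_left (by omega)]
        exact ih lf lp

-- the two shapes of one step of B's loop
theorem pvBStep_skip (mset S : PySem.Set String) (L : Option String) (p : String)
    (h : p ∉ mset ∨ p ∈ S) : pvBStep mset (S, L) p = (S, L) := by
  unfold pvBStep
  rcases h with h | h
  · have c : PySem.Set.contains mset p = false := by
      rw [Bool.eq_false_iff]
      exact fun hc => h ((PySem.Set.contains_iff _ _).mp hc)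
    simp only [c, Bool.false_and, Bool.false_eq_true, if_false]
  · have c : PySem.Set.contains S p = true := (PySem.Set.contains_iff _ _).mpr h
    simp only [c, Bool.not_true, Bool.and_false, Bool.false_eq_true, if_false]

theorem pvBStep_new (mset S : PySem.Set String) (L : Option String) (p : String)
    (h1 : p ∈ mset) (h2 : p ∉ S) : pvBStep mset (S, L) p = (PySem.Set.add S p, some p) := by
  have c1 : PySem.Set.contains mset p = true := (PySem.Set.contains_iff _ _).mpr h1
  have c2 : PySem.Set.contains S p = false := by
    rw [Bool.eq_false_iff]
    exact fun hc => h2 ((PySem.Set.contains_iff _ _).mp hc)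
  unfold pvBStep
  simp only [c1, c2, Bool.not_false, Bool.and_self, if_true]

-- B's loop state: the seen set is the set of matching parts, and the recorded part
-- is exactly the one A's maximal index names
theorem bFold_eq (ms ps : List String) :
    ps.foldl (pvBStep (PySem.Set.ofList ms)) (PySem.Set.empty, none) =
      (PySem.Set.ofList (ps.filter (fun p => PySem.Set.contains (PySem.Set.ofList ms) p)),
        if -1 < pvMax ps ms (-1) then PySem.List.pyGet? ps (pvMax ps ms (-1)) else none) := by
  induction ps using List.reverseRecOn with
  | nil =>
    have hM : pvMax [] ms (-1) = -1 := by
      have h1 := pvMax_le [] ms (-1) (-1) le_rfl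
        (by intro f _ k hk; simp [PySem.List.index?_eq_idxOf?] at hk)
      have h2 := pvMax_ge_acc [] ms (-1)
      omega
    simp [hM, PySem.Set.empty]
  | append_singleton ps p ih =>
    rw [List.foldl_append, ih, List.foldl_cons, List.foldl_nil]
    by_cases hm : p ∈ ms
    · have hcm : PySem.Set.contains (PySem.Set.ofList ms) p = true :=
        (PySem.Set.contains_iff _ _).mpr ((PySem.Set.mem_ofList _ _).mpr hm)
      by_cases hps : p ∈ ps
      · -- p already seen: no update, indices unchanged
        have hseen : PySem.Set.contains
            (PySem.Set.ofList (ps.filter (fun q => PySem.Set.contains (PySem.Set.ofList ms) q))) p = true :=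
          (PySem.Set.contains_iff _ _).mpr
            ((PySem.Set.mem_ofList _ _).mpr (List.mem_filter.mpr ⟨hps, hcm⟩))
        have hcongr : ∀ f ∈ ms, PySem.List.index? (ps ++ [p]) f = PySem.List.index? ps f := by
          intro f _
          by_cases hfps : f ∈ ps
          · exact PySem.List.index?_append_of_mem _ hfps
          · have hfp : f ≠ p := fun h => hfps (h ▸ hps)
            rw [(PySem.List.index?_eq_none_iff _ _).mpr hfps,
              (PySem.List.index?_eq_none_iff _ _).mpr (by simp [hfps, hfp])]
        have hMeq : pvMax (ps ++ [p]) ms (-1) = pvMax ps ms (-1) := pvMax_congr _ _ _ _ hcongr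
        rw [pvBStep_skip _ _ _ _ (Or.inr
          ((PySem.Set.mem_ofList _ _).mpr (List.mem_filter.mpr ⟨hps, hcm⟩)))]
        rw [List.filter_append, List.filter_cons, if_pos hcm, List.filter_nil,
          PySem.Set.ofList_append_singleton,
          PySem.Set.add_of_mem ((PySem.Set.mem_ofList _ _).mpr (List.mem_filter.mpr ⟨hps, hcm⟩)), hMeq]
        by_cases hlt : -1 < pvMax ps ms (-1)
        · rw [if_pos hlt, if_pos hlt, pyGet?_append_of_achieved ps [p] ms hlt]
        · rw [if_neg hlt, if_neg hlt]
      · -- new matching part: recorded, and the maximal index moves to it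
        have hseen : PySem.Set.contains
            (PySem.Set.ofList (ps.filter (fun q => PySem.Set.contains (PySem.Set.ofList ms) q))) p = false := by
          rw [Bool.eq_false_iff]
          intro hc
          exact hps (List.mem_filter.mp ((PySem.Set.mem_ofList _ _).mp
            ((PySem.Set.contains_iff _ _).mp hc))).1
        have hidxp : PySem.List.index? (ps ++ [p]) p = some ps.length :=
          PySem.List.index?_append_singleton_self ps p hps
        have hMeq : pvMax (ps ++ [p]) ms (-1) = (ps.length : Int) := by
          have hge := pvMax_ge_of_mem (ps ++ [p]) ms (-1) p hm ps.length hidxp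
          have hle := pvMax_le (ps ++ [p]) ms (-1) (ps.length : Int) (by omega)
            (by
              intro f _ k hk
              obtain ⟨hkl, -, -⟩ := PySem.List.getElem_of_index?_eq_some hk
              simp only [List.length_append, List.length_cons, List.length_nil] at hkl
              omega)
          omega
        rw [pvBStep_new _ _ _ _ ((PySem.Set.mem_ofList _ _).mpr hm)
          (fun hc => hps (List.mem_filter.mp ((PySem.Set.mem_ofList _ _).mp hc)).1)]
        rw [List.filter_append, List.filter_cons, if_pos hcm, List.filter_nil,
          PySem.Set.ofList_append_singleton, hMeq]
        rw [if_pos (by omega), show ((ps.length : Nat) : Int) = ((ps.length : Nat) : Int) from rfl,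
          PySem.List.pyGet?_natCast, List.getElem?_concat_length]
    · -- non-matching part: nothing changes on either side
      have hcm : PySem.Set.contains (PySem.Set.ofList ms) p = false := by
        rw [Bool.eq_false_iff]
        intro hc
        exact hm ((PySem.Set.mem_ofList _ _).mp ((PySem.Set.contains_iff _ _).mp hc))
      have hcongr : ∀ f ∈ ms, PySem.List.index? (ps ++ [p]) f = PySem.List.index? ps f := by
        intro f hf
        by_cases hfps : f ∈ ps
        · exact PySem.List.index?_append_of_mem _ hfps
        · have hfp : f ≠ p := fun h => hm (h ▸ hf)
          rw [(PySem.List.index?_eq_none_iff _ _).mpr hfps,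
            (PySem.List.index?_eq_none_iff _ _).mpr (by simp [hfps, hfp])]
      have hMeq : pvMax (ps ++ [p]) ms (-1) = pvMax ps ms (-1) := pvMax_congr _ _ _ _ hcongr
      rw [pvBStep_skip _ _ _ _ (Or.inl
        (fun hc => hm ((PySem.Set.mem_ofList _ _).mp hc)))]
      rw [List.filter_append, List.filter_cons, hcm, hMeq]
      simp only [Bool.false_eq_true, if_false, List.filter_nil, List.append_nil]
      by_cases hlt : -1 < pvMax ps ms (-1)
      · rw [if_pos hlt, if_pos hlt, pyGet?_append_of_achieved ps [p] ms hlt]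
      · rw [if_neg hlt, if_neg hlt]

-- ===== VERDICT (by name: the statement is the Claim_ definition above) =====
theorem find_last_feature_spec : Claim_equal_find_last_feature := by
  intro feature_string match_list _
  unfold Spec_find_last_feature find_last_feature find_last_feature_alt
  simp only [aFold_eq, bFold_eq]
  by_cases h : -1 < pvMax ((PySem.Str.split? feature_string "_").getD []) match_list (-1)
  · simp only [if_pos h]
  · simp only [if_neg h]
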